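-- pv_equiv track=rewrite | github.com/Yui0471/VRChat_Logmonitor | main.py | player_count
-- ===== SOURCE A (Python) =====
-- def player_count(data, world_count): # list, int, list
--     player = []
--     del data[: world_count]
--
--     for s in data: # ユーザ名だけ使うのでそれ以外は切り捨てる
--         if "OnPlayerJoined " in s:
--             playername_num = s.find("OnPlayerJoined ") + 15
--             playername = s[playername_num :]
--             player.append(playername)
--
--         if "OnPlayerLeft " in s:
--             playername_num = s.find("OnPlayerLeft ") + 13
--             playername = s[playername_num :]
--             player.remove(playername)
--
--     return player
-- ===== SOURCE B (Python) =====
-- def player_count(data, world_count):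
--     # Same in-place 'del data[:world_count]' side effect as the original; equivalence is about the return value.
--     del data[:world_count]
--     joins = []        # join names in order of appearance
--     lefts = {}        # name -> number of times it left
--     for s in data:
--         i = s.find("OnPlayerJoined ")
--         if i != -1:
--             joins.append(s[i + 15:])
--         j = s.find("OnPlayerLeft ")
--         if j != -1:
--             name = s[j + 13:]
--             lefts[name] = lefts.get(name, 0) + 1
--     # Each 'remove' deletes the earliest still-present join of that name, so the
--     # survivors are exactly the joins after skipping, per name, its first lefts[name] joins.
--     out = []
--     for name in joins:
--         k = lefts.get(name, 0)
--         if k > 0: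
--             lefts[name] = k - 1
--         else:
--             out.append(name)
--     return out
-- ===== Notes on version B (the rewrite author's own statement) =====
-- stated objective: alternative
-- what changed: Instead of building the player list with list.remove (a linear scan per departure), B makes one pass that records joins in order and counts departures per name in a dict, then reconstructs the result by skipping, per name, its first lefts[name] joins; it trades A's remove scans for a second pass and dict upkeep.
import Mathlib
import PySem

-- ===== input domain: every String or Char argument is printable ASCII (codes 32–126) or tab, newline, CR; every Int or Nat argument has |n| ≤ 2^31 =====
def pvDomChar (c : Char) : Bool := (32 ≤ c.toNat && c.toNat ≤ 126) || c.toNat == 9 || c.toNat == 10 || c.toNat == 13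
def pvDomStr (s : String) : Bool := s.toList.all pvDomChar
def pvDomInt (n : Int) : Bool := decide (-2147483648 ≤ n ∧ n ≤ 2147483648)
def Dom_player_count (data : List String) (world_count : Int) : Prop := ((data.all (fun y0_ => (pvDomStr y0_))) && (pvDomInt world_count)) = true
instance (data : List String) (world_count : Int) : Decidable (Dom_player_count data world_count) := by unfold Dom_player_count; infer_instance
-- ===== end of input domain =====

-- B replaces A's list.remove scan-per-departure by one counting pass plus one skip pass
-- (same 'del data[:world_count]' in-place side effect as A; equivalence is about the return value).

-- ===== PORT A =====
-- one step per log line, as in A's for-loop; none = the ValueError of player.remove (excluded by Pre_)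
def pcLoopA : List String → List String → Option (List String)
  | [], player => some player
  | s :: rest, player =>
    let player := if PySem.Str.isIn "OnPlayerJoined " s then
        player ++ [PySem.Str.slice s (some (PySem.Str.find s "OnPlayerJoined " + 15)) none]
      else player
    if PySem.Str.isIn "OnPlayerLeft " s then
      match PySem.List.remove? player (PySem.Str.slice s (some (PySem.Str.find s "OnPlayerLeft " + 13)) none) with
      | none => none
      | some player' => pcLoopA rest player'
    else pcLoopA rest player

def player_count (data : List String) (world_count : Int) : List String :=
  -- 'del data[: world_count]' leaves data[world_count:]
  (pcLoopA (PySem.List.slice data (some world_count) none) []).getD []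

-- ===== PORT B =====
-- first pass body: record the join, count the departure
def pcScanStep (acc : List String × PySem.Dict String Int) (s : String) : List String × PySem.Dict String Int :=
  let i := PySem.Str.find s "OnPlayerJoined "
  let acc := if i ≠ -1 then (acc.1 ++ [PySem.Str.slice s (some (i + 15)) none], acc.2) else acc
  let j := PySem.Str.find s "OnPlayerLeft "
  if j ≠ -1 then
    let name := PySem.Str.slice s (some (j + 13)) none
    (acc.1, acc.2.insert name (acc.2.getD name 0 + 1))
  else acc

-- second pass body: skip this join while its name still has departures left, else keep it
def pcSkipStep (acc : List String × PySem.Dict String Int) (name : String) : List String × PySem.Dict String Int :=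
  let k := acc.2.getD name 0
  if k > 0 then (acc.1, acc.2.insert name (k - 1)) else (acc.1 ++ [name], acc.2)

def player_count_alt (data : List String) (world_count : Int) : List String :=
  let data' := PySem.List.slice data (some world_count) none
  let jl := data'.foldl pcScanStep ([], PySem.Dict.empty)
  (jl.1.foldl pcSkipStep ([], jl.2)).1

-- ===== PRECONDITION & SPEC =====
-- the name a line joins (resp. leaves), exactly as both Pythons extract it
def pcJoinName? (s : String) : Option String :=
  if PySem.Str.isIn "OnPlayerJoined " s then
    some (PySem.Str.slice s (some (PySem.Str.find s "OnPlayerJoined " + 15)) none)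
  else none

def pcLeftName? (s : String) : Option String :=
  if PySem.Str.isIn "OnPlayerLeft " s then
    some (PySem.Str.slice s (some (PySem.Str.find s "OnPlayerLeft " + 13)) none)
  else none

-- Pre_ excludes exactly the inputs on which A's player.remove raises ValueError: some line makes a
-- player leave although he has not joined more often (up to that line) than he has already left.
def Pre_player_count (data : List String) (world_count : Int) : Prop :=
  ∀ i, (hi : i < (PySem.List.slice data (some world_count) none).length) → ∀ b,
    pcLeftName? (PySem.List.slice data (some world_count) none)[i] = some b →
    (((PySem.List.slice data (some world_count) none).take i).filterMap pcLeftName?).count b <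
      (((PySem.List.slice data (some world_count) none).take (i + 1)).filterMap pcJoinName?).count b

instance (data : List String) (world_count : Int) : Decidable (Pre_player_count data world_count) := by
  unfold Pre_player_count; infer_instance

def pvWitness_player_count : List String × Int :=
  (["Log OnPlayerJoined ann", "Log OnPlayerJoined bob", "Log OnPlayerLeft ann"], 0)

def Spec_player_count (data : List String) (world_count : Int) (out : List String) : Prop := out = player_count_alt data world_count
instance (data : List String) (world_count : Int) (out : List String) : Decidable (Spec_player_count data world_count out) := by unfold Spec_player_count; infer_instance

-- ===== CLAIM (what is proved, stated in full; the proofs are below) =====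
def Claim_equal_player_count : Prop := ∀ (data : List String) (world_count : Int), Dom_player_count data world_count → Pre_player_count data world_count → Spec_player_count data world_count (player_count data world_count)

-- ===== LEMMAS AND PROOFS =====

-- drop, per name x, the first f x occurrences of x (the common characterisation of both results)
def pcRD : List String → (String → Nat) → List String
  | [], _ => []
  | a :: t, f =>
    if f a = 0 then a :: pcRD t f
    else pcRD t (fun x => if x = a then f x - 1 else f x)

theorem pcRD_append_singleton (J : List String) (a : String) (f : String → Nat)
    (h : f a ≤ J.count a) : pcRD (J ++ [a]) f = pcRD J f ++ [a] := by
  induction J generalizing f with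
  | nil =>
    simp only [List.count_nil, Nat.le_zero] at h
    simp [pcRD, h]
  | cons x t ih =>
    by_cases hx : f x = 0
    · simp only [List.cons_append, pcRD, if_pos hx]
      rw [ih]
      rcases eq_or_ne a x with rfl | hax
      · simp [hx]
      · simp only [List.count_cons, beq_iff_eq] at h
        simp [Ne.symm hax] at h; omega
    · simp only [List.cons_append, pcRD, if_neg hx]
      rw [ih]
      rcases eq_or_ne a x with rfl | hax
      · simp only [List.count_cons, beq_iff_eq] at h
        simp at h ⊢
        omega
      · rw [if_neg hax]
        simp only [List.count_cons, beq_iff_eq] at h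
        simp [Ne.symm hax] at h; omega

theorem pcRD_remove (J : List String) (b : String) (f : String → Nat)
    (h : f b < J.count b) :
    PySem.List.remove? (pcRD J f) b = some (pcRD J (fun x => if x = b then f x + 1 else f x)) := by
  induction J generalizing f with
  | nil => simp [List.count_nil] at h
  | cons a t ih =>
    by_cases ha : f a = 0
    · rcases eq_or_ne a b with rfl | hab
      · have hfun : (fun x => if x = a then (if x = a then f x + 1 else f x) - 1 else (if x = a then f x + 1 else f x)) = f := by
          funext x
          rcases eq_or_ne x a with rfl | hx
          · simp
          · simp [hx]
        simp only [pcRD]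
        rw [if_pos ha, PySem.List.remove?_cons_self]
        simp [hfun]
      · have hg : (if a = b then f a + 1 else f a) = f a := if_neg hab
        have hcount : f b < List.count b t := by
          simp only [List.count_cons, beq_iff_eq] at h; simp [hab] at h; exact h
        simp only [pcRD]
        rw [if_pos ha, PySem.List.remove?_cons_of_ne _ hab, ih _ hcount, hg, if_pos ha]
        rfl
    · have hne : ¬ (if a = b then f a + 1 else f a) = 0 := by
        rcases eq_or_ne a b with rfl | hab
        · simp
        · simp [hab, ha]
      have hfun : (fun x => if x = a then (if x = b then f x + 1 else f x) - 1 else (if x = b then f x + 1 else f x))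
           = (fun x => if x = b then (if x = a then f x - 1 else f x) + 1 else (if x = a then f x - 1 else f x)) := by
        funext x
        rcases eq_or_ne x a with rfl | hx
        · rcases eq_or_ne x b with rfl | hxb
          · simp; omega
          · simp [hxb]
        · rcases eq_or_ne x b with rfl | hxb
          · simp [hx]
          · simp [hx, hxb]
      simp only [pcRD]
      rw [if_neg ha, if_neg hne, hfun]
      apply ih
      rcases eq_or_ne a b with rfl | hab
      · simp only [List.count_cons, beq_iff_eq] at h
        simp at h ⊢
        omega
      · simp only [List.count_cons, beq_iff_eq] at h
        simp [hab, Ne.symm hab] at h ⊢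
        omega

-- the branch tests of both loop bodies, read through pcJoinName? / pcLeftName?
theorem pcJoin_isIn_iff (s : String) :
    PySem.Str.isIn "OnPlayerJoined " s = true ↔ PySem.Str.find s "OnPlayerJoined " ≠ -1 := by
  rw [PySem.Str.isIn_iff_infix, PySem.Str.find_ne_neg_one_iff]

theorem pcLeft_isIn_iff (s : String) :
    PySem.Str.isIn "OnPlayerLeft " s = true ↔ PySem.Str.find s "OnPlayerLeft " ≠ -1 := by
  rw [PySem.Str.isIn_iff_infix, PySem.Str.find_ne_neg_one_iff]

-- one step of A's loop, on a state of the pcRD shape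
theorem pcStep (s : String) (rest : List String) (J : List String) (f : String → Nat)
    (h1 : ∀ x, f x ≤ J.count x)
    (hb : ∀ b, pcLeftName? s = some b → f b < (J ++ [s].filterMap pcJoinName?).count b) :
    pcLoopA (s :: rest) (pcRD J f) =
      pcLoopA rest (pcRD (J ++ [s].filterMap pcJoinName?)
        (fun x => f x + ([s].filterMap pcLeftName?).count x)) := by
  simp only [pcLoopA]
  by_cases hj : PySem.Str.isIn "OnPlayerJoined " s = true
  · have hJfm : [s].filterMap pcJoinName? =
        [PySem.Str.slice s (some (PySem.Str.find s "OnPlayerJoined " + 15)) none] := by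
      have hj2 := hj; simp at hj2; simp [pcJoinName?, hj2]
    have happ : pcRD J f ++ [PySem.Str.slice s (some (PySem.Str.find s "OnPlayerJoined " + 15)) none]
        = pcRD (J ++ [s].filterMap pcJoinName?) f := by
      rw [hJfm]; exact (pcRD_append_singleton J _ f (h1 _)).symm
    rw [if_pos hj, happ]
    by_cases hl : PySem.Str.isIn "OnPlayerLeft " s = true
    · have hLfm : pcLeftName? s =
          some (PySem.Str.slice s (some (PySem.Str.find s "OnPlayerLeft " + 13)) none) := by
        have hl2 := hl; simp at hl2; simp [pcLeftName?, hl2]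
      have hbb := hb _ hLfm
      rw [if_pos hl, pcRD_remove _ _ f hbb]
      have hLfm1 : [s].filterMap pcLeftName? =
          [PySem.Str.slice s (some (PySem.Str.find s "OnPlayerLeft " + 13)) none] := by
        simp [List.filterMap, hLfm]
      have hfun : (fun x => f x + ([s].filterMap pcLeftName?).count x) =
          (fun x => if x = PySem.Str.slice s (some (PySem.Str.find s "OnPlayerLeft " + 13)) none then f x + 1 else f x) := by
        funext x
        rw [hLfm1]
        rcases eq_or_ne x (PySem.Str.slice s (some (PySem.Str.find s "OnPlayerLeft " + 13)) none) with rfl | hx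
        · simp
        · simp at hx ⊢
          simp [hx, Ne.symm hx]
      rw [hfun]
    · have hLfm : pcLeftName? s = none := by have hl2 := hl; simp at hl2; simp [pcLeftName?, hl2]
      have hLfm1 : [s].filterMap pcLeftName? = [] := by simp [List.filterMap, hLfm]
      have hfun : (fun x => f x + ([s].filterMap pcLeftName?).count x) = f := by
        funext x; rw [hLfm1]; simp
      rw [if_neg hl, hfun]
  · have hJfm : [s].filterMap pcJoinName? = [] := by have hj2 := hj; simp at hj2; simp [pcJoinName?, hj2]
    rw [if_neg hj]
    by_cases hl : PySem.Str.isIn "OnPlayerLeft " s = true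
    · have hLfm : pcLeftName? s =
          some (PySem.Str.slice s (some (PySem.Str.find s "OnPlayerLeft " + 13)) none) := by
        have hl2 := hl; simp at hl2; simp [pcLeftName?, hl2]
      have hbb := hb _ hLfm
      rw [hJfm, List.append_nil] at hbb
      have hbb' : f (PySem.Str.slice s (some (PySem.Str.find s "OnPlayerLeft " + 13)) none) <
          J.count (PySem.Str.slice s (some (PySem.Str.find s "OnPlayerLeft " + 13)) none) := hbb
      rw [if_pos hl, pcRD_remove _ _ f hbb']
      have hLfm1 : [s].filterMap pcLeftName? =
          [PySem.Str.slice s (some (PySem.Str.find s "OnPlayerLeft " + 13)) none] := by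
        simp [List.filterMap, hLfm]
      have hfun : (fun x => f x + ([s].filterMap pcLeftName?).count x) =
          (fun x => if x = PySem.Str.slice s (some (PySem.Str.find s "OnPlayerLeft " + 13)) none then f x + 1 else f x) := by
        funext x
        rw [hLfm1]
        rcases eq_or_ne x (PySem.Str.slice s (some (PySem.Str.find s "OnPlayerLeft " + 13)) none) with rfl | hx
        · simp
        · simp at hx ⊢
          simp [hx, Ne.symm hx]
      rw [hfun, hJfm, List.append_nil]
    · have hLfm : pcLeftName? s = none := by have hl2 := hl; simp at hl2; simp [pcLeftName?, hl2]
      have hLfm1 : [s].filterMap pcLeftName? = [] := by simp [List.filterMap, hLfm]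
      have hfun : (fun x => f x + ([s].filterMap pcLeftName?).count x) = f := by
        funext x; rw [hLfm1]; simp
      rw [if_neg hl, hfun, hJfm, List.append_nil]

theorem pcLoopA_eq (lines : List String) (J : List String) (f : String → Nat)
    (h1 : ∀ x, f x ≤ J.count x)
    (h2 : ∀ i, (hi : i < lines.length) → ∀ b, pcLeftName? lines[i] = some b →
      f b + ((lines.take i).filterMap pcLeftName?).count b <
        J.count b + ((lines.take (i + 1)).filterMap pcJoinName?).count b) :
    pcLoopA lines (pcRD J f) =
      some (pcRD (J ++ lines.filterMap pcJoinName?)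
        (fun x => f x + (lines.filterMap pcLeftName?).count x)) := by
  induction lines generalizing J f with
  | nil => simp [pcLoopA]
  | cons s rest ih =>
    have hb : ∀ b, pcLeftName? s = some b → f b < (J ++ [s].filterMap pcJoinName?).count b := by
      intro b hbs
      have h0 := h2 0 (by simp) b (by simpa using hbs)
      simpa [List.count_append] using h0
    rw [pcStep s rest J f h1 hb]
    have h1' : ∀ x, (fun x => f x + ([s].filterMap pcLeftName?).count x) x ≤ (J ++ [s].filterMap pcJoinName?).count x := by
      intro x
      cases hcase : pcLeftName? s with
      | none =>
        simp only [List.filterMap, hcase]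
        simp [List.count_append]
        have := h1 x
        omega
      | some b =>
        have h01 : [s].filterMap pcLeftName? = [b] := by simp [List.filterMap, hcase]
        rw [h01]
        rcases eq_or_ne x b with rfl | hx
        · have := hb x hcase
          simp [List.count_append] at this ⊢
          omega
        · simp [Ne.symm hx, List.count_append]
          have := h1 x
          omega
    have h2' : ∀ i, (hi : i < rest.length) → ∀ b', pcLeftName? rest[i] = some b' →
        (fun x => f x + ([s].filterMap pcLeftName?).count x) b' + ((rest.take i).filterMap pcLeftName?).count b' <
          (J ++ [s].filterMap pcJoinName?).count b' + ((rest.take (i + 1)).filterMap pcJoinName?).count b' := by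
      intro i hi b' hbi
      have h0 := h2 (i + 1) (by simpa using Nat.succ_lt_succ hi) b' (by simpa using hbi)
      have e1 : (s :: rest).take (i + 1) = [s] ++ rest.take i := by simp [List.take_succ_cons]
      have e2 : (s :: rest).take (i + 2) = [s] ++ rest.take (i + 1) := by simp [List.take_succ_cons]
      rw [e1, e2, List.filterMap_append, List.filterMap_append, List.count_append, List.count_append] at h0
      simp only [List.count_append]
      omega
    rw [ih (J ++ [s].filterMap pcJoinName?) _ h1' h2']
    rw [show (s :: rest) = [s] ++ rest from rfl, List.filterMap_append, List.filterMap_append, ← List.append_assoc]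
    congr 1
    congr 1
    funext x
    simp only [List.count_append]
    omega

theorem pcScanStep_eq (acc : List String × PySem.Dict String Int) (s : String) :
    pcScanStep acc s =
      ((match pcJoinName? s with | some a => acc.1 ++ [a] | none => acc.1),
       (match pcLeftName? s with
        | some b => acc.2.insert b (acc.2.getD b 0 + 1)
        | none => acc.2)) := by
  simp only [pcScanStep, pcJoinName?, pcLeftName?]
  by_cases hj : PySem.Str.find s "OnPlayerJoined " = -1
  · have hj2 : PySem.Str.isIn "OnPlayerJoined " s = false := by
      rw [← Bool.not_eq_true, pcJoin_isIn_iff]; simpa using hj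
    by_cases hl : PySem.Str.find s "OnPlayerLeft " = -1
    · have hl2 : PySem.Str.isIn "OnPlayerLeft " s = false := by
        rw [← Bool.not_eq_true, pcLeft_isIn_iff]; simpa using hl
      simp at hj hl hj2 hl2
      simp [hj, hl, hj2, hl2]
    · have hl2 : PySem.Str.isIn "OnPlayerLeft " s = true := (pcLeft_isIn_iff s).mpr hl
      simp at hj hl hj2 hl2
      simp [hj, hl, hj2, hl2]
  · have hj2 : PySem.Str.isIn "OnPlayerJoined " s = true := (pcJoin_isIn_iff s).mpr hj
    by_cases hl : PySem.Str.find s "OnPlayerLeft " = -1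
    · have hl2 : PySem.Str.isIn "OnPlayerLeft " s = false := by
        rw [← Bool.not_eq_true, pcLeft_isIn_iff]; simpa using hl
      simp at hj hl hj2 hl2
      simp [hj, hl, hj2, hl2]
    · have hl2 : PySem.Str.isIn "OnPlayerLeft " s = true := (pcLeft_isIn_iff s).mpr hl
      simp at hj hl hj2 hl2
      simp [hj, hl, hj2, hl2]

theorem pcScanB (lines : List String) (js : List String) (d : PySem.Dict String Int) :
    (lines.foldl pcScanStep (js, d)).1 = js ++ lines.filterMap pcJoinName? ∧
    ∀ x, ((lines.foldl pcScanStep (js, d)).2).getD x 0 =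
      d.getD x 0 + ((lines.filterMap pcLeftName?).count x : Int) := by
  induction lines generalizing js d with
  | nil => simp
  | cons s rest ih =>
    cases hj : pcJoinName? s with
    | none =>
      cases hl : pcLeftName? s with
      | none =>
        obtain ⟨ihl, ihr⟩ := ih js d
        refine ⟨?_, fun x => ?_⟩
        · simpa [List.foldl_cons, pcScanStep_eq, hj, hl, List.filterMap_cons] using ihl
        · simpa [List.foldl_cons, pcScanStep_eq, hj, hl, List.filterMap_cons] using ihr x
      | some b =>
        obtain ⟨ihl, ihr⟩ := ih js (d.insert b (d.getD b 0 + 1))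
        refine ⟨?_, fun x => ?_⟩
        · simpa [List.foldl_cons, pcScanStep_eq, hj, hl, List.filterMap_cons] using ihl
        · have h2 := ihr x
          rw [PySem.Dict.getD_insert] at h2
          simp only [List.foldl_cons, pcScanStep_eq, hj, hl, List.filterMap_cons]
          rw [h2]
          rcases eq_or_ne x b with rfl | hx
          · simp; omega
          · simp [hx, Ne.symm hx]
    | some a =>
      cases hl : pcLeftName? s with
      | none =>
        obtain ⟨ihl, ihr⟩ := ih (js ++ [a]) d
        refine ⟨?_, fun x => ?_⟩
        · simpa [List.foldl_cons, pcScanStep_eq, hj, hl, List.filterMap_cons] using ihl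
        · simpa [List.foldl_cons, pcScanStep_eq, hj, hl, List.filterMap_cons] using ihr x
      | some b =>
        obtain ⟨ihl, ihr⟩ := ih (js ++ [a]) (d.insert b (d.getD b 0 + 1))
        refine ⟨?_, fun x => ?_⟩
        · simpa [List.foldl_cons, pcScanStep_eq, hj, hl, List.filterMap_cons] using ihl
        · have h2 := ihr x
          rw [PySem.Dict.getD_insert] at h2
          simp only [List.foldl_cons, pcScanStep_eq, hj, hl, List.filterMap_cons]
          rw [h2]
          rcases eq_or_ne x b with rfl | hx
          · simp; omega
          · simp [hx, Ne.symm hx]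

theorem pcSkipB (joins : List String) (out : List String) (d : PySem.Dict String Int)
    (h : ∀ x, 0 ≤ d.getD x 0) :
    (joins.foldl pcSkipStep (out, d)).1 = out ++ pcRD joins (fun x => (d.getD x 0).toNat) := by
  induction joins generalizing out d with
  | nil => simp [pcRD]
  | cons a t ih =>
    simp only [List.foldl_cons, pcSkipStep]
    by_cases hk : d.getD a 0 > 0
    · rw [if_pos hk]
      have hd' : ∀ x, 0 ≤ (d.insert a (d.getD a 0 - 1)).getD x 0 := by
        intro x
        rw [PySem.Dict.getD_insert]
        rcases eq_or_ne x a with rfl | hx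
        · simp; omega
        · rw [if_neg hx]; exact h x
      rw [ih _ _ hd']
      have hfa : ¬ ((d.getD a 0).toNat = 0) := by omega
      have hfun : (fun x => (((d.insert a (d.getD a 0 - 1)).getD x 0).toNat)) =
          (fun x => if x = a then (d.getD x 0).toNat - 1 else (d.getD x 0).toNat) := by
        funext x
        rw [PySem.Dict.getD_insert]
        rcases eq_or_ne x a with rfl | hx
        · simp
        · simp [hx]
      rw [hfun]
      conv_rhs => rw [pcRD]
      rw [if_neg hfa]
    · rw [if_neg hk]
      have hfa : (d.getD a 0).toNat = 0 := by have := h a; omega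
      rw [ih _ _ h]
      conv_rhs => rw [pcRD]
      rw [if_pos hfa]
      simp

-- ===== VERDICT (by name: the statement is the Claim_ definition above) =====
theorem player_count_spec : Claim_equal_player_count := by
  intro data wc _hdom hpre
  unfold Spec_player_count player_count player_count_alt
  unfold Pre_player_count at hpre
  set L := PySem.List.slice data (some wc) none with hL
  -- A's loop computes the rank-drop of the joins by the departure counts
  have hA := pcLoopA_eq L [] (fun _ => 0) (fun x => Nat.zero_le _)
    (by intro i hi b hbi
        have := hpre i hi b hbi
        simpa using this)
  have e0 : pcRD ([] : List String) (fun _ => 0) = [] := rfl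
  rw [e0] at hA
  simp only [List.nil_append, Nat.zero_add] at hA
  rw [hA, Option.getD_some]
  -- B computes the same rank-drop
  have hBscan := pcScanB L [] PySem.Dict.empty
  have hd0 : ∀ x, ((L.foldl pcScanStep ([], PySem.Dict.empty)).2).getD x 0 =
      ((L.filterMap pcLeftName?).count x : Int) := by
    intro x
    rw [hBscan.2 x, PySem.Dict.getD_empty]
    simp
  have hBskip := pcSkipB ((L.foldl pcScanStep ([], PySem.Dict.empty)).1) []
    ((L.foldl pcScanStep ([], PySem.Dict.empty)).2)
    (fun x => by rw [hd0 x]; exact Int.natCast_nonneg _)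
  show _ = ((L.foldl pcScanStep ([], PySem.Dict.empty)).1.foldl pcSkipStep
      ([], (L.foldl pcScanStep ([], PySem.Dict.empty)).2)).1
  rw [hBskip, hBscan.1, List.nil_append, List.nil_append]
  congr 1
  funext x
  rw [hd0 x]
  simp
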